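-- pv_equiv track=rewrite | github.com/DangNhatNam/project_phase1 | bt7.py | multiplying
-- ===== SOURCE A (Python) =====
-- def multiplying(a):
--     i = 1
--     b = 0
--     c = 0
--     d = 0
--     while b < a:
--         d = b*i
--         b = i
--         i += 1
--         c += d
--     return c
-- ===== SOURCE B (Python) =====
-- def multiplying(a):
--     # sum of k*(k+1) for k = 0..a-1, closed form (a-1)*a*(a+1)//3
--     if a <= 0:
--         return 0
--     return (a - 1) * a * (a + 1) // 3
-- ===== Notes on version B (the rewrite author's own statement) =====
-- stated objective: faster
-- what changed: Replaced the O(a) while-loop accumulating b*i with the closed-form cubic formula for the sum of k*(k+1), with a guard returning zero for non-positive a.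
import Mathlib
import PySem

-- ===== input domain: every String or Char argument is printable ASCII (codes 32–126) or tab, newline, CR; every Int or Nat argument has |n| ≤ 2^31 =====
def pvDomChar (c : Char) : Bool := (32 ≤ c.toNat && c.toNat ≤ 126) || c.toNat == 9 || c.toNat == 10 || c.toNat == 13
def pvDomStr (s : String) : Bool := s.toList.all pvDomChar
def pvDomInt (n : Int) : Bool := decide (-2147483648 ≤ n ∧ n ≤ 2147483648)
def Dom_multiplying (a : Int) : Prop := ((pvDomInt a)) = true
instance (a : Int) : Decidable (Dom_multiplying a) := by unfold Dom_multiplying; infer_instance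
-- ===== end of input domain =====

-- B replaces A's O(a) accumulation loop by the closed form (a-1)*a*(a+1)//3.

-- ===== PORT A =====
-- the while loop of A; state (i, b, c); the invariant i = b + 1 (true at entry
-- and preserved) is carried as an argument to justify termination
def multiplyingLoop (a i b c : Int) (h : i = b + 1) : Int :=
  if hb : b < a then
    multiplyingLoop a (i + 1) i (c + b * i) (by omega)
  else
    c
termination_by (a - b).toNat
decreasing_by omega

def multiplying (a : Int) : Int :=
  multiplyingLoop a 1 0 0 rfl

-- ===== PORT B =====
def multiplying_alt (a : Int) : Int :=
  if a ≤ 0 then 0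
  else PySem.Int.floordiv ((a - 1) * a * (a + 1)) 3

-- ===== PRECONDITION & SPEC =====
def Spec_multiplying (a : Int) (out : Int) : Prop := out = multiplying_alt a
instance (a : Int) (out : Int) : Decidable (Spec_multiplying a out) := by unfold Spec_multiplying; infer_instance

-- ===== CLAIM (what is proved, stated in full; the proofs are below) =====
def Claim_equal_multiplying : Prop := ∀ (a : Int), Dom_multiplying a → Spec_multiplying a (multiplying a)

-- ===== LEMMAS AND PROOFS =====

theorem multiplyingLoop_closed (n : Nat) :
    ∀ (a b c : Int), (a - b).toNat = n →
      3 * multiplyingLoop a (b + 1) b c rfl =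
        3 * c + (if b < a then (a - 1) * a * (a + 1) - (b - 1) * b * (b + 1) else 0) := by
  induction n with
  | zero =>
    intro a b c hn
    have hba : ¬ b < a := by omega
    rw [multiplyingLoop]
    simp [hba]
  | succ k ih =>
    intro a b c hn
    have hba : b < a := by omega
    rw [multiplyingLoop]
    rw [dif_pos hba]
    simp only [hba, if_true]
    have := ih a (b + 1) (c + b * (b + 1)) (by omega)
    rw [this]
    by_cases h2 : b + 1 < a
    · simp only [h2, if_true]; ring
    · have : a = b + 1 := by omega
      subst this
      simp only [h2, if_false]; ring

theorem multiplying_spec : Claim_equal_multiplying := by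
  intro a _
  unfold Spec_multiplying multiplying multiplying_alt
  have h := multiplyingLoop_closed (a - 0).toNat a 0 0 rfl
  norm_num at h
  by_cases ha : a ≤ 0
  · have h0 : ¬ (0 : Int) < a := by omega
    simp only [h0, if_false] at h
    simp [ha]
    omega
  · have h0 : (0 : Int) < a := by omega
    simp only [h0, if_true] at h
    simp only [ha, if_false]
    rw [PySem.Int.floordiv_eq_ediv_of_pos (by norm_num)]
    have h3 : (a - 1) * a * (a + 1) = 3 * multiplyingLoop a 1 0 0 rfl := by omega
    rw [h3, Int.mul_ediv_cancel_left _ (by norm_num)]
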